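-- pv_equiv track=rewrite | github.com/sillle14/splendor | GUI/controller.py | get_card
-- ===== SOURCE A (Python) =====
-- def get_card(x, y):
--     # returns card that's been clicked on
--     w = 125
--     h = 200
--     for i in range(3):
--         for j in range(4):
--             if 0 < (x - (100 + j * 135)) < w and 0 < (y - (100 + (2 - i) * 210)) < h:
--                 return i, j
--     return None
-- ===== SOURCE B (Python) =====
-- def get_card(x, y):
--     # returns card that's been clicked on
--     # direct arithmetic lookup of the unique candidate cell instead of scanning the 3x4 grid
--     j = (x - 100) // 135
--     i = 2 - (y - 100) // 210
--     if 0 <= j < 4 and 0 <= i < 3 and 0 < x - (100 + j * 135) < 125 and 0 < y - (100 + (2 - i) * 210) < 200: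
--         return i, j
--     return None
-- ===== Notes on version B (the rewrite author's own statement) =====
-- stated objective: simpler
-- what changed: Replaces the 3x4 nested-loop scan of grid cells with a direct arithmetic lookup: floor-divide the offsets to get the unique candidate cell, then check its bounds once.
import Mathlib
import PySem

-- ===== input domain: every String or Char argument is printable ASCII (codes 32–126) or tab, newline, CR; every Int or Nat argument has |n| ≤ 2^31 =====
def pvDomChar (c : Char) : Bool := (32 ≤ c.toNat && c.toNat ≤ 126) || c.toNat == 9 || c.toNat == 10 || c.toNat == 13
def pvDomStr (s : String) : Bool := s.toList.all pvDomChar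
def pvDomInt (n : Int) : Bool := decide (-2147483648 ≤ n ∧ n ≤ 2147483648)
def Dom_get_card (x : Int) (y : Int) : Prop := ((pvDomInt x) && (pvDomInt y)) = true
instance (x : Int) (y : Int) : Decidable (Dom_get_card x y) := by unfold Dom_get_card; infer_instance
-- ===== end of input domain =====

-- B replaces A's 3x4 nested-loop scan by a direct floor-division lookup of the unique candidate cell (simpler).

-- ===== PORT A =====
-- inner 'for j in range(4)' with early return
def get_card_inner (x y w h i : Int) : List Int → Option (Int × Int)
  | [] => none
  | j :: js =>
    if 0 < x - (100 + j * 135) ∧ x - (100 + j * 135) < w ∧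
       0 < y - (100 + (2 - i) * 210) ∧ y - (100 + (2 - i) * 210) < h then
      some (i, j)
    else get_card_inner x y w h i js

-- outer 'for i in range(3)' with early return
def get_card_outer (x y w h : Int) : List Int → Option (Int × Int)
  | [] => none
  | i :: is =>
    match get_card_inner x y w h i (PySem.List.pyRange 0 4 1) with
    | some r => some r
    | none => get_card_outer x y w h is

def get_card (x : Int) (y : Int) : Option (Int × Int) :=
  let w : Int := 125
  let h : Int := 200
  get_card_outer x y w h (PySem.List.pyRange 0 3 1)

-- ===== PORT B =====
def get_card_alt (x : Int) (y : Int) : Option (Int × Int) :=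
  let j := PySem.Int.floordiv (x - 100) 135
  let i := 2 - PySem.Int.floordiv (y - 100) 210
  if 0 ≤ j ∧ j < 4 ∧ 0 ≤ i ∧ i < 3 ∧
     0 < x - (100 + j * 135) ∧ x - (100 + j * 135) < 125 ∧
     0 < y - (100 + (2 - i) * 210) ∧ y - (100 + (2 - i) * 210) < 200 then
    some (i, j) else none

-- ===== PRECONDITION & SPEC =====
def Spec_get_card (x : Int) (y : Int) (out : Option (Int × Int)) : Prop := out = get_card_alt x y
instance (x : Int) (y : Int) (out : Option (Int × Int)) : Decidable (Spec_get_card x y out) := by unfold Spec_get_card; infer_instance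

-- ===== CLAIM (what is proved, stated in full; the proofs are below) =====
def Claim_equal_get_card : Prop := ∀ (x : Int) (y : Int), Dom_get_card x y → Spec_get_card x y (get_card x y)

-- ===== LEMMAS AND PROOFS =====

-- If cell (i, j) is hit, B's arithmetic lookup computes exactly (i, j).
theorem alt_of_cell (x y i j : Int) (hi0 : 0 ≤ i) (hi3 : i < 3) (hj0 : 0 ≤ j) (hj4 : j < 4)
    (h1 : 0 < x - (100 + j * 135)) (h2 : x - (100 + j * 135) < 125)
    (h3 : 0 < y - (100 + (2 - i) * 210)) (h4 : y - (100 + (2 - i) * 210) < 200) :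
    get_card_alt x y = some (i, j) := by
  have hj : PySem.Int.floordiv (x - 100) 135 = j := by
    rw [PySem.Int.floordiv_eq_iff_of_pos (by norm_num)]; omega
  have hk : PySem.Int.floordiv (y - 100) 210 = 2 - i := by
    rw [PySem.Int.floordiv_eq_iff_of_pos (by norm_num)]; omega
  simp only [get_card_alt]
  split_ifs with h
  · simp only [Option.some.injEq, Prod.mk.injEq]; omega
  · exfalso; omega

-- If no cell is hit, B's lookup finds nothing.
theorem alt_of_none (x y : Int)
    (h : ∀ i j : Int, 0 ≤ i → i < 3 → 0 ≤ j → j < 4 →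
      ¬(0 < x - (100 + j * 135) ∧ x - (100 + j * 135) < 125 ∧
        0 < y - (100 + (2 - i) * 210) ∧ y - (100 + (2 - i) * 210) < 200)) :
    get_card_alt x y = none := by
  simp only [get_card_alt]
  split_ifs with hc
  · exact absurd ⟨hc.2.2.2.2.1, hc.2.2.2.2.2.1, hc.2.2.2.2.2.2.1, hc.2.2.2.2.2.2.2⟩
      (h _ _ hc.2.2.1 hc.2.2.2.1 hc.1 hc.2.1)
  · rfl

-- Characterisation of the inner row scan.
theorem inner_none_iff (x y w h i : Int) (L : List Int) :
    get_card_inner x y w h i L = none ↔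
      ∀ j ∈ L, ¬(0 < x - (100 + j * 135) ∧ x - (100 + j * 135) < w ∧
        0 < y - (100 + (2 - i) * 210) ∧ y - (100 + (2 - i) * 210) < h) := by
  induction L with
  | nil => simp [get_card_inner]
  | cons j js ih =>
    simp only [get_card_inner, List.mem_cons]
    split_ifs with hc
    · simp only [false_iff]
      intro hfa
      exact hfa j (Or.inl rfl) hc
    · constructor
      · rintro hn k (rfl | hk)
        · exact hc
        · exact (ih.mp hn) k hk
      · intro hfa; exact ih.mpr fun k hk => hfa k (Or.inr hk)

theorem inner_some (x y w h i a b : Int) (L : List Int)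
    (hL : get_card_inner x y w h i L = some (a, b)) :
    a = i ∧ b ∈ L ∧ 0 < x - (100 + b * 135) ∧ x - (100 + b * 135) < w ∧
      0 < y - (100 + (2 - i) * 210) ∧ y - (100 + (2 - i) * 210) < h := by
  induction L with
  | nil => simp [get_card_inner] at hL
  | cons j js ih =>
    simp only [get_card_inner] at hL
    split_ifs at hL with hc
    · obtain ⟨rfl, rfl⟩ : i = a ∧ j = b := by
        simpa [eq_comm] using hL
      exact ⟨rfl, List.mem_cons_self .., hc⟩
    · obtain ⟨ha, hb, hrest⟩ := ih hL
      exact ⟨ha, List.mem_cons_of_mem _ hb, hrest⟩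

theorem outer_none_iff (x y w h : Int) (L : List Int) :
    get_card_outer x y w h L = none ↔
      ∀ i ∈ L, get_card_inner x y w h i (PySem.List.pyRange 0 4 1) = none := by
  induction L with
  | nil => simp [get_card_outer]
  | cons i is ih =>
    simp only [get_card_outer, List.mem_cons]
    cases hin : get_card_inner x y w h i (PySem.List.pyRange 0 4 1) with
    | some r =>
      constructor
      · intro h; exact absurd h (by simp)
      · intro hfa; exact absurd hin (by simp [hfa i (Or.inl rfl)])
    | none =>
      constructor
      · rintro hn k (rfl | hk)
        · exact hin
        · exact (ih.mp hn) k hk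
      · intro hfa; exact ih.mpr fun k hk => hfa k (Or.inr hk)

theorem outer_some (x y w h : Int) (r : Int × Int) (L : List Int)
    (hL : get_card_outer x y w h L = some r) :
    ∃ i ∈ L, get_card_inner x y w h i (PySem.List.pyRange 0 4 1) = some r := by
  induction L with
  | nil => simp [get_card_outer] at hL
  | cons i is ih =>
    simp only [get_card_outer] at hL
    cases hin : get_card_inner x y w h i (PySem.List.pyRange 0 4 1) with
    | some r' =>
      rw [hin] at hL
      exact ⟨i, List.mem_cons_self .., by simpa using hL ▸ hin⟩
    | none =>
      rw [hin] at hL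
      obtain ⟨k, hk, hks⟩ := ih hL
      exact ⟨k, List.mem_cons_of_mem _ hk, hks⟩

-- ===== VERDICT (by name: the statement is the Claim_ definition above) =====
theorem get_card_spec : Claim_equal_get_card := by
  intro x y _
  unfold Spec_get_card
  have hr3 : PySem.List.pyRange 0 3 1 = [0, 1, 2] := by decide
  have hr4 : PySem.List.pyRange 0 4 1 = [0, 1, 2, 3] := by decide
  cases hA : get_card x y with
  | some r =>
    obtain ⟨a, b⟩ := r
    obtain ⟨i, hi, hinner⟩ := outer_some x y 125 200 (a, b) _ hA
    obtain ⟨rfl, hb, hcond⟩ := inner_some x y 125 200 i a b _ hinner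
    rw [hr3] at hi
    rw [hr4] at hb
    simp only [List.mem_cons, List.not_mem_nil, or_false] at hi hb
    exact (alt_of_cell x y a b (by omega) (by omega) (by omega) (by omega)
      hcond.1 hcond.2.1 hcond.2.2.1 hcond.2.2.2).symm
  | none =>
    refine (alt_of_none x y ?_).symm
    intro i j hi0 hi3 hj0 hj4 hc
    have hout := (outer_none_iff x y 125 200 _).mp hA
    have hi' : i ∈ PySem.List.pyRange 0 3 1 := by
      rw [hr3]; simp only [List.mem_cons, List.not_mem_nil, or_false]; omega
    have hj' : j ∈ PySem.List.pyRange 0 4 1 := by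
      rw [hr4]; simp only [List.mem_cons, List.not_mem_nil, or_false]; omega
    exact (inner_none_iff x y 125 200 i _).mp (hout i hi') j hj' hc
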